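-- pv_equiv track=rewrite | github.com/MrBrantCode/unitest_baseline | mut_generate/mist_train_taco/taco_15930/solution.py | is_tree_with_even_edge_counts_possible
-- ===== SOURCE A (Python) =====
-- def is_tree_with_even_edge_counts_possible(N, M, queries):
--     cnt = [0] * (N + 10)
--
--     for a, b in queries:
--         cnt[a] += 1
--         cnt[b] += 1
--
--     for c in cnt:
--         if c % 2 == 1:
--             return 'NO'
--
--     return 'YES'
-- ===== SOURCE B (Python) =====
-- def is_tree_with_even_edge_counts_possible(N, M, queries):
--     # Sort the flattened endpoint list; every value has even multiplicity
--     # iff the sorted list splits into consecutive equal pairs.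
--     ends = sorted(v for a, b in queries for v in (a, b))
--     ends.reverse()  # use as a stack: pop() yields the sorted order front-first
--     while ends:
--         if len(ends) == 1 or ends[-1] != ends[-2]:
--             return 'NO'
--         ends.pop()
--         ends.pop()
--     return 'YES'
-- ===== Notes on version B (the rewrite author's own statement) =====
-- stated objective: alternative
-- what changed: Replaces the size-(N+10) degree-count array and parity scan by sorting the flattened endpoint list and checking that consecutive disjoint pairs are equal (every value has even multiplicity iff the sorted list pairs up).
-- outside the precondition, e.g. on is_tree_with_even_edge_counts_possible(0, 1, [(-1, 9)]): A returns 'YES', B returns 'NO'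
-- crash fix: On queries containing a vertex index outside [-(N+10), N+10) A raises IndexError, while B (sorting the vertex values themselves) returns the parity answer for the given labels. — e.g. on is_tree_with_even_edge_counts_possible(0, 1, [(100, 0)]): A raises IndexError, B returns "NO"
import Mathlib
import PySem

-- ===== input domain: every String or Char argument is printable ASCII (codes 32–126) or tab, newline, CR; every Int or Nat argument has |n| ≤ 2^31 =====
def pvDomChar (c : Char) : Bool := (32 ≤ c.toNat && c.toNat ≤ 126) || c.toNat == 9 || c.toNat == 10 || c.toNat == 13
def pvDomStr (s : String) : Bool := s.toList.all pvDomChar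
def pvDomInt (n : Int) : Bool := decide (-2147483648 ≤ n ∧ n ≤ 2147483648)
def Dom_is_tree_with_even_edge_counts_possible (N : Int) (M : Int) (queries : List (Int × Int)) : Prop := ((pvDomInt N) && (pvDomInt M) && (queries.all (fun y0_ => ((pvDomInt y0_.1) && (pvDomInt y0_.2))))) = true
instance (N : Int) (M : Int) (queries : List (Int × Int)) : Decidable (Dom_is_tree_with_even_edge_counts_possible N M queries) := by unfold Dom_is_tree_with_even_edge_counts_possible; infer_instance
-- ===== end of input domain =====

-- B replaces A's degree-count array + parity scan by sorting the flattened endpoint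
-- list and checking it splits into consecutive equal pairs (objective: alternative).

-- ===== PORT A =====
-- cnt[x] += 1, with Python's negative-index wrap and IndexError (none) semantics
def pvIncr (cnt : Option (List Int)) (x : Int) : Option (List Int) :=
  match cnt with
  | none => none
  | some l =>
    match PySem.List.pyGet? l x with
    | none => none
    | some v => PySem.List.pySet? l x (v + 1)

def is_tree_with_even_edge_counts_possible (N : Int) (M : Int) (queries : List (Int × Int)) : String :=
  let cnt0 : List Int := List.replicate (N + 10).toNat 0
  match queries.foldl (fun c p => pvIncr (pvIncr c p.1) p.2) (some cnt0) with
  | none => "NO"  -- unreachable inside Pre_ (Python raises IndexError here)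
  | some cnt =>
    -- 'for c in cnt: if c % 2 == 1: return NO' — an early-return scan, i.e. List.any
    if cnt.any (fun c => PySem.Int.mod c 2 == 1) then "NO" else "YES"

-- ===== PORT B =====
-- the 'while ends' pop loop of Source B; the Lean list is the Python stack in pop order
-- (Source B reverses the sorted list and pops from its end, so pops consume the sorted
-- order front-first — exactly this head-first recursion)
def pvPairs : List Int → String
  | [] => "YES"
  | [_] => "NO"                                 -- the 'len(ends) == 1' guard
  | x :: y :: t => if x ≠ y then "NO" else pvPairs t

def is_tree_with_even_edge_counts_possible_alt (N : Int) (M : Int) (queries : List (Int × Int)) : String :=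
  let ends := PySem.List.sorted (queries.flatMap (fun p => [p.1, p.2])) (fun v => v) false
  pvPairs ends

-- ===== PRECONDITION & SPEC =====
-- Pre_ requires every vertex index to lie in [0, N+10): indices in [-(N+10), 0) are
-- excluded because there A still returns, but its fixed array silently wraps the index
-- to slot x+N+10 — an artefact of the array representation that value-keyed sorting does
-- not reproduce; indices outside [-(N+10), N+10) make A raise IndexError (see Raises_).
def Pre_is_tree_with_even_edge_counts_possible (N : Int) (M : Int) (queries : List (Int × Int)) : Prop :=
  ∀ p ∈ queries, 0 ≤ p.1 ∧ p.1 < N + 10 ∧ 0 ≤ p.2 ∧ p.2 < N + 10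
instance (N : Int) (M : Int) (queries : List (Int × Int)) : Decidable (Pre_is_tree_with_even_edge_counts_possible N M queries) := by unfold Pre_is_tree_with_even_edge_counts_possible; infer_instance

def pvWitness_is_tree_with_even_edge_counts_possible : Int × Int × (List (Int × Int)) := (2, 2, [(0, 1), (1, 0)])

-- On queries containing a vertex index outside [-(N+10), N+10) A raises IndexError,
-- while B (sorting the vertex values themselves) returns the parity answer.
def Raises_is_tree_with_even_edge_counts_possible (N : Int) (M : Int) (queries : List (Int × Int)) : Prop :=
  ∃ p ∈ queries, ¬(-(N + 10) ≤ p.1 ∧ p.1 < N + 10) ∨ ¬(-(N + 10) ≤ p.2 ∧ p.2 < N + 10)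
instance (N : Int) (M : Int) (queries : List (Int × Int)) : Decidable (Raises_is_tree_with_even_edge_counts_possible N M queries) := by unfold Raises_is_tree_with_even_edge_counts_possible; infer_instance

def pvRaiseWitness_is_tree_with_even_edge_counts_possible : Int × Int × (List (Int × Int)) := (0, 1, [(100, 0)])
def pvRaiseWitnessOut_is_tree_with_even_edge_counts_possible : String := "NO"

def Spec_is_tree_with_even_edge_counts_possible (N : Int) (M : Int) (queries : List (Int × Int)) (out : String) : Prop := out = is_tree_with_even_edge_counts_possible_alt N M queries
instance (N : Int) (M : Int) (queries : List (Int × Int)) (out : String) : Decidable (Spec_is_tree_with_even_edge_counts_possible N M queries out) := by unfold Spec_is_tree_with_even_edge_counts_possible; infer_instance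

-- ===== CLAIM (what is proved, stated in full; the proofs are below) =====
def Claim_equal_is_tree_with_even_edge_counts_possible : Prop := ∀ (N : Int) (M : Int) (queries : List (Int × Int)), Dom_is_tree_with_even_edge_counts_possible N M queries → Pre_is_tree_with_even_edge_counts_possible N M queries → Spec_is_tree_with_even_edge_counts_possible N M queries (is_tree_with_even_edge_counts_possible N M queries)

def Claim_raises_is_tree_with_even_edge_counts_possible : Prop := (∀ (N : Int) (M : Int) (queries : List (Int × Int)), Dom_is_tree_with_even_edge_counts_possible N M queries → Raises_is_tree_with_even_edge_counts_possible N M queries → ¬ Pre_is_tree_with_even_edge_counts_possible N M queries) ∧ (Dom_is_tree_with_even_edge_counts_possible (pvRaiseWitness_is_tree_with_even_edge_counts_possible.1) (pvRaiseWitness_is_tree_with_even_edge_counts_possible.2.1) (pvRaiseWitness_is_tree_with_even_edge_counts_possible.2.2) ∧ Raises_is_tree_with_even_edge_counts_possible (pvRaiseWitness_is_tree_with_even_edge_counts_possible.1) (pvRaiseWitness_is_tree_with_even_edge_counts_possible.2.1) (pvRaiseWitness_is_tree_with_even_edge_counts_possible.2.2) ∧ is_tree_with_even_edge_counts_possible_alt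 (pvRaiseWitness_is_tree_with_even_edge_counts_possible.1) (pvRaiseWitness_is_tree_with_even_edge_counts_possible.2.1) (pvRaiseWitness_is_tree_with_even_edge_counts_possible.2.2) = pvRaiseWitnessOut_is_tree_with_even_edge_counts_possible)

-- ===== LEMMAS AND PROOFS =====

-- the pair-fold over queries equals a fold over the flattened endpoint list
lemma pvFoldA_flat (qs : List (Int × Int)) (c : Option (List Int)) :
    qs.foldl (fun c p => pvIncr (pvIncr c p.1) p.2) c
      = (qs.flatMap (fun p => [p.1, p.2])).foldl pvIncr c := by
  induction qs generalizing c with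
  | nil => rfl
  | cons q t ih => simp [List.flatMap_cons, List.foldl_cons, ih]

lemma pvIncr_some (l : List Int) (x : Int) (h0 : 0 ≤ x) (h : x < (l.length : Int)) :
    pvIncr (some l) x = some (l.set x.toNat (l.getD x.toNat 0 + 1)) := by
  have hn : x.toNat < l.length := by omega
  have hget : PySem.List.pyGet? l x = some (l.getD x.toNat 0) := by
    rw [PySem.List.pyGet?_eq_some_getElem l h0 h, List.getD_eq_getElem?_getD]
    simp [List.getElem?_eq_getElem hn]
  have hx : x = ((x.toNat : Nat) : Int) := by omega
  simp only [pvIncr, hget]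
  rw [hx]
  exact PySem.List.pySet?_natCast l x.toNat _ hn

lemma pvGetD_set (l : List Int) (i j : Nat) (v : Int) (h : i < l.length) :
    (l.set i v).getD j 0 = if j = i then v else l.getD j 0 := by
  by_cases hj : j = i
  · subst hj; simp [List.getD_eq_getElem?_getD, h]
  · simp [List.getD_eq_getElem?_getD, List.getElem?_set_ne (by omega : i ≠ j), hj]

-- A's fold computes occurrence counts: slot i ends at start value + count of i in xs
lemma pvFoldCount (xs : List Int) (l : List Int)
    (hx : ∀ x ∈ xs, 0 ≤ x ∧ x < (l.length : Int)) :
    ∃ l', xs.foldl pvIncr (some l) = some l' ∧ l'.length = l.length ∧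
      ∀ i : Nat, i < l.length →
        l'.getD i 0 = l.getD i 0 + (xs.count (i : Int) : Int) := by
  induction xs generalizing l with
  | nil => exact ⟨l, rfl, rfl, by simp⟩
  | cons x t ih =>
    obtain ⟨hx0, hxlt⟩ := hx x (by simp)
    have hxn : x.toNat < l.length := by omega
    simp only [List.foldl_cons, pvIncr_some l x hx0 hxlt]
    obtain ⟨l', he, hlen, hcnt⟩ :=
      ih (l.set x.toNat (l.getD x.toNat 0 + 1))
        (by intro y hy; have := hx y (by simp [hy]); simpa using this)
    refine ⟨l', he, by simpa using hlen, ?_⟩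
    intro i hi
    have := hcnt i (by simpa using hi)
    rw [this, pvGetD_set l x.toNat i _ hxn]
    by_cases hix : i = x.toNat
    · subst hix
      rw [if_pos rfl]
      have hxi : ((x.toNat : Nat) : Int) = x := by omega
      rw [hxi, List.count_cons_self]
      push_cast; ring
    · rw [if_neg hix]
      have hne : ((i : Nat) : Int) ≠ x := by omega
      simp [List.count_cons, Ne.symm hne]

-- the pair scan only ever returns "YES" or "NO"
lemma pvPairs_total : ∀ (l : List Int), pvPairs l = "YES" ∨ pvPairs l = "NO"
  | [] => Or.inl rfl
  | [_] => Or.inr rfl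
  | x :: y :: t => by
    rw [pvPairs]
    by_cases h : x = y
    · rw [if_neg (by simpa using h)]
      exact pvPairs_total t
    · rw [if_pos (by simpa using h)]
      exact Or.inr rfl

-- on a sorted even-length list, the pair scan says YES iff every value has even count
lemma pvPairs_sorted : ∀ (l : List Int), Even l.length → l.Pairwise (· ≤ ·) →
    ((pvPairs l = "YES") ↔ ∀ v : Int, Even (l.count v))
  | [], _, _ => by simp [pvPairs]
  | [x], hlen, _ => by simp [Nat.even_add_one] at hlen
  | x :: y :: t, hlen, hsort => by
    have ht : Even t.length := by
      simp only [List.length_cons] at hlen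
      rcases hlen with ⟨r, hr⟩
      exact ⟨r - 1, by omega⟩
    obtain ⟨hxy, hyt, htp⟩ : x ≤ y ∧ (∀ z ∈ t, y ≤ z) ∧ t.Pairwise (· ≤ ·) := by
      rw [List.pairwise_cons, List.pairwise_cons] at hsort
      exact ⟨hsort.1 y (by simp), hsort.2.1, hsort.2.2⟩
    rw [pvPairs]
    by_cases hxy' : x = y
    · subst hxy'
      rw [if_neg (by simp)]
      rw [pvPairs_sorted t ht htp]
      constructor
      · intro h v
        have := h v
        rcases eq_or_ne v x with rfl | hv
        · simpa [List.count_cons, Nat.even_add] using this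
        · simpa [List.count_cons, hv.symm] using this
      · intro h v
        have := h v
        rcases eq_or_ne v x with rfl | hv
        · simpa [List.count_cons, Nat.even_add] using this
        · simpa [List.count_cons, hv.symm] using this
    · rw [if_pos (by simpa using hxy')]
      constructor
      · intro h; exact absurd h (by decide)
      · intro h
        exfalso
        have hlt : x < y := lt_of_le_of_ne hxy hxy'
        have hct : t.count x = 0 :=
          List.count_eq_zero.mpr (fun hmem => absurd (hyt x hmem) (by omega))
        have hthis := h x
        simp [List.count_cons, hct, hxy', Ne.symm hxy', Nat.even_add_one] at hthis

-- ===== VERDICT (by name: the statement is the Claim_ definition above) =====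
theorem is_tree_with_even_edge_counts_possible_spec : Claim_equal_is_tree_with_even_edge_counts_possible := by
  intro N M queries _ hpre
  unfold Spec_is_tree_with_even_edge_counts_possible
  unfold is_tree_with_even_edge_counts_possible is_tree_with_even_edge_counts_possible_alt
  simp only []
  rw [pvFoldA_flat]
  set l0 : List Int := List.replicate (N + 10).toNat 0 with hl0
  set xs : List Int := queries.flatMap (fun p => [p.1, p.2]) with hxs
  have hx : ∀ x ∈ xs, 0 ≤ x ∧ x < (l0.length : Int) := by
    intro x hxmem
    rw [hxs, List.mem_flatMap] at hxmem
    obtain ⟨p, hp, hmem⟩ := hxmem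
    obtain ⟨h1, h2, h3, h4⟩ := hpre p hp
    have hlen : (l0.length : Int) = N + 10 := by
      rw [hl0, List.length_replicate]; omega
    rw [hlen]
    simp only [List.mem_cons, List.not_mem_nil, or_false] at hmem
    rcases hmem with rfl | rfl
    · exact ⟨h1, h2⟩
    · exact ⟨h3, h4⟩
  obtain ⟨l', he, hlen, hcnt⟩ := pvFoldCount xs l0 hx
  rw [he]
  have hcnt' : ∀ i : Nat, i < l'.length → l'.getD i 0 = (xs.count (i : Int) : Int) := by
    intro i hi
    have hL : l0.length = (N + 10).toNat := by rw [hl0]; simp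
    have hh := hcnt i (hlen ▸ hi)
    simp only [hl0, List.getD_eq_getElem?_getD, List.getElem?_replicate] at hh
    rw [if_pos (by omega : i < (N + 10).toNat)] at hh
    rw [List.getD_eq_getElem?_getD]
    simpa using hh
  -- the sorted endpoint list B scans
  set ends := PySem.List.sorted xs (fun v => v) false with hends
  have hperm : ends.Perm xs := PySem.List.sorted_perm xs (fun v => v) false
  have hsort : ends.Pairwise (· ≤ ·) := by
    simpa using PySem.List.sorted_pairwise xs (fun v => v)
  have hevenlen : Even ends.length := by
    rw [hperm.length_eq, hxs]
    induction queries with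
    | nil => simp
    | cons q t iht => simpa [List.flatMap_cons, Nat.even_add] using iht
  have hBcnt : (pvPairs ends = "YES") ↔ ∀ v : Int, Even (xs.count v) := by
    rw [pvPairs_sorted ends hevenlen hsort]
    exact forall_congr' (fun v => by rw [hperm.count_eq])
  -- A's parity scan says some count is odd iff not all counts are even
  have hA : (l'.any (fun c => PySem.Int.mod c 2 == 1) = true) ↔
      ¬ ∀ v : Int, Even (xs.count v) := by
    rw [List.any_eq_true]
    constructor
    · rintro ⟨c, hc, hodd⟩ hall
      obtain ⟨i, hi, rfl⟩ := List.mem_iff_getElem.mp hc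
      have hg : l'[i] = (xs.count (i : Int) : Int) := by
        have := hcnt' i hi
        rwa [List.getD_eq_getElem?_getD, List.getElem?_eq_getElem hi, Option.getD_some] at this
      rw [hg, PySem.Int.mod_eq_emod_of_pos (by norm_num : (0:Int) < 2), beq_iff_eq] at hodd
      have hev := hall (i : Int)
      rw [Nat.even_iff] at hev
      omega
    · intro hnot
      rw [not_forall] at hnot
      obtain ⟨v, hv⟩ := hnot
      have hv0 : 0 ≤ v ∧ v < (l'.length : Int) := by
        by_contra hcon
        apply hv
        have hnm : v ∉ xs := by
          intro hmem
          have := hx v hmem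
          omega
        simp [List.count_eq_zero.mpr hnm]
      have hn : v.toNat < l'.length := by omega
      refine ⟨l'[v.toNat], List.getElem_mem hn, ?_⟩
      have hg : l'[v.toNat] = (xs.count v : Int) := by
        have := hcnt' v.toNat hn
        rw [List.getD_eq_getElem?_getD, List.getElem?_eq_getElem hn, Option.getD_some] at this
        rwa [show ((v.toNat : Nat) : Int) = v by omega] at this
      rw [hg, PySem.Int.mod_eq_emod_of_pos (by norm_num : (0:Int) < 2), beq_iff_eq]
      rw [Nat.even_iff] at hv
      omega
  have hred : (match some l' with
      | none => "NO"
      | some cnt => if (cnt.any fun c => PySem.Int.mod c 2 == 1) = true then "NO" else "YES")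
    = (if (l'.any fun c => PySem.Int.mod c 2 == 1) = true then "NO" else "YES") := rfl
  rw [hred]
  by_cases hall : ∀ v : Int, Even (xs.count v)
  · rw [if_neg (fun hc => (hA.mp hc) hall), (hBcnt.mpr hall).symm]
  · rw [if_pos (hA.mpr hall)]
    rcases pvPairs_total ends with hY | hN
    · exact absurd (hBcnt.mp hY) hall
    · exact hN.symm

@[simp] theorem is_tree_with_even_edge_counts_possible_raises : Claim_raises_is_tree_with_even_edge_counts_possible := by
  unfold Claim_raises_is_tree_with_even_edge_counts_possible
  refine ⟨?_, by decide⟩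
  rintro N M queries _ ⟨p, hp, hbad⟩ hpre
  have := hpre p hp
  rcases hbad with h | h <;> omega
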